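-- pv_equiv track=rewrite | github.com/amit920114/DSA | DSA/Recursion-1/reLect2.py | sumArr
-- ===== SOURCE A (Python) =====
-- def sumArr(list, si):
--     l = len(list)
--     if l == 0 or si == l:
--         return 0
--     if si == l-1:
--         return list[si]
--     k = sumArr(list, si+1)
--     op = k + list[si]
--     return op
-- ===== SOURCE B (Python) =====
-- def sumArr(list, si):
--     total = 0
--     for i in range(si, len(list)):
--         total += list[i]
--     return total
-- ===== Notes on version B (the rewrite author's own statement) =====
-- stated objective: simpler
-- what changed: Replaces A's tail-building recursion (recurse on si+1, add list[si] on the way back) with a single iterative accumulation loop over range(si, len(list)).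
-- outside the precondition, e.g. on sumArr([], -1): A returns 0, B raises IndexError
import Mathlib
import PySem

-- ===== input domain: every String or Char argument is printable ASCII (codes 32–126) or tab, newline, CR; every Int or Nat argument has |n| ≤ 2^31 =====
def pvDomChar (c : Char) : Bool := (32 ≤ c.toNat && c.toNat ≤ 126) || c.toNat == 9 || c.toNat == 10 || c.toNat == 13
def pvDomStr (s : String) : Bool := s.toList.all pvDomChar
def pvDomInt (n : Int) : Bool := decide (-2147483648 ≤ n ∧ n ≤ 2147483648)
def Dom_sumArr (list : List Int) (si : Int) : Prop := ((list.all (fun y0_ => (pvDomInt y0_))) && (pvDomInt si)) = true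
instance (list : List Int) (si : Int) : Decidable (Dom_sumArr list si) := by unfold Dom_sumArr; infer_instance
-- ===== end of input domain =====

-- B replaces A's recursion (recurse on si+1, add list[si] unwinding) with one iterative
-- accumulation loop over range(si, len(list)); equal return values on Pre_ (objective: simpler).

-- ===== PORT A =====
-- Python's recursion on si+1 has no structural measure for si > len(list) (there it recurses
-- forever: RecursionError, excluded by Pre_); the port uses fuel. Under Pre_ the recursion depth
-- is at most (len - si).toNat ≤ 2*len, so fuel 2*len+1 never runs out and the fuel-0 branch is
-- unreachable. pyGetD's default 0 is the IndexError case, unreachable under Pre_.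
def sumArrGo : Nat → List Int → Int → Int
  | 0, _, _ => 0
  | fuel+1, list, si =>
    let l : Int := list.length
    if l = 0 ∨ si = l then 0
    else if si = l - 1 then PySem.List.pyGetD list si 0
    else sumArrGo fuel list (si + 1) + PySem.List.pyGetD list si 0

def sumArr (list : List Int) (si : Int) : Int :=
  sumArrGo (2 * list.length + 1) list si

-- ===== PORT B =====
def sumArr_alt (list : List Int) (si : Int) : Int :=
  (PySem.List.pyRange si (list.length : Int) 1).foldl
    (fun total i => total + PySem.List.pyGetD list i 0) 0

-- ===== PRECONDITION & SPEC =====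
-- Pre_ excludes (a) si > len(list) on a non-empty list, where A raises RecursionError
-- (see Raises_ below), (b) si < -len(list), where both programs raise IndexError, and
-- (c) the defensible corner si < 0 on the empty list, where A's 0 is an accident of its
-- l==0 check preceding any indexing while B's loop hits the IndexError of list[si].
def Pre_sumArr (list : List Int) (si : Int) : Prop :=
  if list = [] then 0 ≤ si
  else -(list.length : Int) ≤ si ∧ si ≤ (list.length : Int)
instance (list : List Int) (si : Int) : Decidable (Pre_sumArr list si) := by
  unfold Pre_sumArr; infer_instance

def pvWitness_sumArr : List Int × Int := ([3, -1, 4], -2)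

def Spec_sumArr (list : List Int) (si : Int) (out : Int) : Prop := out = sumArr_alt list si
instance (list : List Int) (si : Int) (out : Int) : Decidable (Spec_sumArr list si out) := by
  unfold Spec_sumArr; infer_instance

-- ===== CLAIM (what is proved, stated in full; the proofs are below) =====
def Claim_equal_sumArr : Prop := ∀ (list : List Int) (si : Int),
  Dom_sumArr list si → Pre_sumArr list si → Spec_sumArr list si (sumArr list si)

-- ===== LEMMAS AND PROOFS =====

-- B's loop is the sum of list[i] over range(si, len(list)).
lemma sumArr_alt_eq_sum (list : List Int) (si : Int) :
    sumArr_alt list si =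
      ((PySem.List.pyRange si (list.length : Int) 1).map
        (fun i => PySem.List.pyGetD list i 0)).sum := by
  unfold sumArr_alt
  rw [PySem.List.foldl_add]
  simp

-- A's recursion computes the same sum whenever the fuel covers the remaining steps
-- and si does not exceed the length.
lemma sumArrGo_eq_sum (list : List Int) (fuel : Nat) (si : Int)
    (hle : si ≤ (list.length : Int)) (hfuel : ((list.length : Int) - si).toNat ≤ fuel)
    (hne : list ≠ []) :
    sumArrGo fuel list si =
      ((PySem.List.pyRange si (list.length : Int) 1).map
        (fun i => PySem.List.pyGetD list i 0)).sum := by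
  induction fuel generalizing si with
  | zero =>
    have hsi : si = (list.length : Int) := by omega
    simp [sumArrGo, hsi, PySem.List.pyRange_one_eq_nil]
  | succ fuel ih =>
    have hl0 : (list.length : Int) ≠ 0 := by
      have := List.length_pos_of_ne_nil hne; omega
    by_cases hsl : si = (list.length : Int)
    · simp [sumArrGo, hsl, PySem.List.pyRange_one_eq_nil]
    · have hlt : si < (list.length : Int) := lt_of_le_of_ne hle hsl
      rw [PySem.List.pyRange_one_cons hlt]
      by_cases hlast : si = (list.length : Int) - 1
      · simp [sumArrGo, hlast, hne]
      · have hrec := ih (si + 1) (by omega) (by omega)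
        simp only [sumArrGo, hl0, hsl, hlast, if_false, false_or, List.map_cons, List.sum_cons]
        rw [hrec]; ring

theorem sumArr_spec : Claim_equal_sumArr := by
  intro list si _ hpre
  unfold Spec_sumArr sumArr
  rw [sumArr_alt_eq_sum]
  by_cases hne : list = []
  · subst hne
    have h0 : (0 : Int) ≤ si := by simpa [Pre_sumArr] using hpre
    have : PySem.List.pyRange si 0 1 = [] := PySem.List.pyRange_one_eq_nil (by omega)
    simp [sumArrGo, this]
  · have hpre' : -(list.length : Int) ≤ si ∧ si ≤ (list.length : Int) := by
      simpa [Pre_sumArr, hne] using hpre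
    exact sumArrGo_eq_sum list _ si hpre'.2 (by omega) hne
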